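-- pv_equiv track=rewrite | github.com/Lucien950/Contests | CodeForces/Round #875/mergeArr.py | getSubLengths
-- ===== SOURCE A (Python) =====
-- from collections import defaultdict
--
-- def getSubLengths(l: list[int]):
--     lsubs: defaultdict[int, int] = defaultdict(int)
--     streak = 1
--     for i, thisEl in enumerate(l):
--         lastEl = l[i-1]
--         if i == 0: continue
--         if thisEl == lastEl: streak += 1
--         else:
--             lsubs[lastEl] = max(streak, lsubs[lastEl])
--             streak = 1
--     lsubs[l[-1]] = max(streak, lsubs[l[-1]])
--     return lsubs
-- ===== SOURCE B (Python) =====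
-- from collections import defaultdict
--
-- def getSubLengths(l: list[int]):
--     # Staged boundary approach: first compute all run-boundary indices by index
--     # arithmetic, then fold each (start, end) segment's length into the dict.
--     n = len(l)
--     cuts = [0] + [i for i in range(1, n) if l[i] != l[i - 1]] + [n]
--     lsubs: defaultdict[int, int] = defaultdict(int)
--     for s, e in zip(cuts, cuts[1:]):
--         lsubs[l[s]] = max(e - s, lsubs[l[s]])
--     return lsubs
-- ===== Notes on version B (the rewrite author's own statement) =====
-- stated objective: alternative
-- what changed: Replaces A's single streaming pass with a streak counter and l[i-1] predecessor comparison by a staged computation: first materialise the list of run-boundary indices, then derive each run's value and length by index subtraction over zipped adjacent boundaries and fold them into the dict.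
import Mathlib
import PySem

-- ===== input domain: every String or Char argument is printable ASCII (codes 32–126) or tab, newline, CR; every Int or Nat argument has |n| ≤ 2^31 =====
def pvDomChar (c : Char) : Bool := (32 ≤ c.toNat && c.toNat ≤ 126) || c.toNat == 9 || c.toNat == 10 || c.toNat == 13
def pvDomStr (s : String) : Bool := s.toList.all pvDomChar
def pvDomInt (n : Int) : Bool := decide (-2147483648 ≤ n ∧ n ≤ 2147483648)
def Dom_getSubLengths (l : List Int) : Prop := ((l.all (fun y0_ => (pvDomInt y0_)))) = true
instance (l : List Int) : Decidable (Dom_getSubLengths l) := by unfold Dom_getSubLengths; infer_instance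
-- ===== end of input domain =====

-- B replaces A's streaming streak counter by a staged boundary-index computation (alternative, same cost).

-- ===== PORT A =====
def getSubLengths (l : List Int) : List (Int × Int) :=
  let fin := (PySem.List.enumerate l 0).foldl
    (fun (st : PySem.Dict Int Int × Int) (p : Int × Int) =>
      match PySem.List.pyGet? l (p.1 - 1) with
      | none => st  -- IndexError (only reachable on l = [], excluded by Pre_)
      | some lastEl =>
        if p.1 == 0 then st
        else if p.2 == lastEl then (st.1, st.2 + 1)
        else (st.1.insert lastEl (max st.2 (st.1.getD lastEl 0)), 1))
    (PySem.Dict.empty, 1)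
  match PySem.List.pyGet? l (-1) with
  | none => []  -- IndexError on l = []; excluded by Pre_
  | some last => (fin.1.insert last (max fin.2 (fin.1.getD last 0))).items

-- ===== PORT B =====
-- the comprehension [i for i in range(1, len(l)) if l[i] != l[i-1]]
def pvMid (l : List Int) : List Int :=
  (PySem.List.pyRange 1 (l.length : Int) 1).filter
    (fun i => !(PySem.List.pyGet? l i == PySem.List.pyGet? l (i - 1)))

def getSubLengths_alt (l : List Int) : List (Int × Int) :=
  let cuts : List Int := 0 :: (pvMid l ++ [(l.length : Int)])
  ((cuts.zip (PySem.List.slice cuts (some 1) none)).foldl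
    (fun (d : PySem.Dict Int Int) (p : Int × Int) =>
      match PySem.List.pyGet? l p.1 with
      | none => d  -- IndexError (only reachable on l = [], excluded by Pre_)
      | some v => d.insert v (max (p.2 - p.1) (d.getD v 0)))
    PySem.Dict.empty).items

-- ===== PRECONDITION & SPEC =====
-- Both programs raise IndexError on the empty list (A indexes l[-1], B indexes l[0]).
def Pre_getSubLengths (l : List Int) : Prop := l ≠ []
instance (l : List Int) : Decidable (Pre_getSubLengths l) := by unfold Pre_getSubLengths; infer_instance
def pvWitness_getSubLengths : List Int := [1, 1, 2]

def Spec_getSubLengths (l : List Int) (out : List (Int × Int)) : Prop := out = getSubLengths_alt l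
instance (l : List Int) (out : List (Int × Int)) : Decidable (Spec_getSubLengths l out) := by unfold Spec_getSubLengths; infer_instance

-- ===== CLAIM (what is proved, stated in full; the proofs are below) =====
def Claim_equal_getSubLengths : Prop := ∀ (l : List Int), Dom_getSubLengths l → Pre_getSubLengths l → Spec_getSubLengths l (getSubLengths l)

-- ===== LEMMAS AND PROOFS =====

-- the (value, run length) pairs of the maximal runs of l, in order (proof-side spec both ports meet)
def pvRuns : List Int → List (Int × Int)
  | [] => []
  | x :: xs =>
    (x, 1 + ((xs.takeWhile (· == x)).length : Int)) :: pvRuns (xs.dropWhile (· == x))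
termination_by l => l.length
decreasing_by
  simpa using Nat.lt_succ_of_le (List.length_dropWhile_le _ _)

-- the common fold both ports reduce to
def pvRunsFold (l : List Int) (d : PySem.Dict Int Int) : PySem.Dict Int Int :=
  (pvRuns l).foldl (fun d p => d.insert p.1 (max p.2 (d.getD p.1 0))) d

-- ---- A side ----

-- A's loop restated with the previous element carried along, plus the final last-element insert
def loopA : Int → Int → PySem.Dict Int Int → List Int → PySem.Dict Int Int
  | prev, streak, d, [] => d.insert prev (max streak (d.getD prev 0))
  | prev, streak, d, x :: xs =>
    if x == prev then loopA x (streak + 1) d xs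
    else loopA x 1 (d.insert prev (max streak (d.getD prev 0))) xs

-- A's enumerate/pyGet? fold over the tail, followed by the last-element insert, is loopA
theorem foldA_eq_loopA (t : List Int) : ∀ (pre : List Int) (prev : Int)
    (d : PySem.Dict Int Int) (streak : Int),
    (let l := pre ++ prev :: t
     let fin := (PySem.List.enumerate t ((pre.length : Int) + 1)).foldl
       (fun (st : PySem.Dict Int Int × Int) (p : Int × Int) =>
         match PySem.List.pyGet? l (p.1 - 1) with
         | none => st
         | some lastEl =>
           if p.1 == 0 then st
           else if p.2 == lastEl then (st.1, st.2 + 1)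
           else (st.1.insert lastEl (max st.2 (st.1.getD lastEl 0)), 1))
       (d, streak)
     match PySem.List.pyGet? l (-1) with
     | none => ([] : List (Int × Int))
     | some last => (fin.1.insert last (max fin.2 (fin.1.getD last 0))).items)
    = (loopA prev streak d t).items := by
  induction t with
  | nil =>
    intro pre prev d streak
    simp [PySem.List.enumerate_nil, PySem.List.pyGet?_neg_one_append_singleton, loopA]
  | cons x xs ih =>
    intro pre prev d streak
    simp only [PySem.List.enumerate_cons, List.foldl_cons]
    have hidx : ((pre.length : Int) + 1) - 1 = (pre.length : Int) := by ring
    have hget : PySem.List.pyGet? (pre ++ prev :: x :: xs) ((pre.length : Int)) = some prev :=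
      PySem.List.pyGet?_append_length pre (x :: xs) prev
    have hne : (((pre.length : Int) + 1) == 0) = false := by
      simp; omega
    by_cases hx : (x == prev) = true
    · have hxv : x = prev := eq_of_beq hx
      have := ih (pre ++ [prev]) x d (streak + 1)
      simp only [List.append_assoc, List.cons_append, List.nil_append,
        List.length_append, List.length_cons, List.length_nil] at this
      simp only [hidx, hxv, beq_self_eq_true, if_true, loopA]
      push_cast at this ⊢
      rw [show (pre.length : Int) + 1 + 1 = (pre.length : Int) + (0 + 1) + 1 by ring] at this
      simpa [hxv] using this
    · have := ih (pre ++ [prev]) x (d.insert prev (max streak (d.getD prev 0))) 1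
      simp only [List.append_assoc, List.cons_append, List.nil_append,
        List.length_append, List.length_cons, List.length_nil] at this
      simp only [hidx, hget, hne, hx, if_false, Bool.false_eq_true, loopA]
      push_cast at this ⊢
      rw [show (pre.length : Int) + 1 + 1 = (pre.length : Int) + (0 + 1) + 1 by ring] at this
      simpa using this

-- loopA consumes exactly the runs of prev :: t, folding the max-insert over them
theorem loopA_eq_runs_fold (t : List Int) : ∀ (prev streak : Int) (d : PySem.Dict Int Int),
    loopA prev streak d t =
      ((prev, streak + ((t.takeWhile (· == prev)).length : Int)) ::
          pvRuns (t.dropWhile (· == prev))).foldl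
        (fun (d : PySem.Dict Int Int) (p : Int × Int) => d.insert p.1 (max p.2 (d.getD p.1 0)))
        d := by
  induction t with
  | nil => intro prev streak d; simp [loopA, pvRuns]
  | cons x xs ih =>
    intro prev streak d
    by_cases hx : (x == prev) = true
    · have hxv : x = prev := eq_of_beq hx
      simp only [loopA, if_true, List.takeWhile_cons, List.dropWhile_cons, hxv,
        beq_self_eq_true, List.length_cons]
      rw [ih prev (streak + 1) d]
      have harith : streak + (((xs.takeWhile (· == prev)).length + 1 : Nat) : Int)
          = streak + 1 + ((xs.takeWhile (· == prev)).length : Int) := by push_cast; ring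
      rw [harith]
    · simp only [loopA, hx, if_false, Bool.false_eq_true, List.takeWhile_cons,
        List.dropWhile_cons]
      rw [ih x 1 (d.insert prev (max streak (d.getD prev 0)))]
      simp [pvRuns]

-- ---- B side ----

theorem pvMid_single (x : Int) : pvMid [x] = [] := by
  simp [pvMid]

theorem pvMid_cons (x y : Int) (ys : List Int) :
    pvMid (x :: y :: ys) =
      if y == x then (pvMid (y :: ys)).map (· + 1)
      else 1 :: (pvMid (y :: ys)).map (· + 1) := by
  have hg1 : PySem.List.pyGet? (x :: y :: ys) ((1:Int) + ((0:Nat):Int)) = some y := by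
    rw [show (1:Int) + ((0:Nat):Int) = ((0:Nat):Int) + 1 by norm_num,
      PySem.List.pyGet?_cons_succ]
    simp
  have hpred : ∀ k : Nat,
      (!(PySem.List.pyGet? (x :: y :: ys) ((1:Int) + ((k+1 : Nat):Int)) ==
         PySem.List.pyGet? (x :: y :: ys) ((1:Int) + ((k+1 : Nat):Int) - 1)))
      = (!(PySem.List.pyGet? (y :: ys) ((1:Int) + (k:Int)) ==
           PySem.List.pyGet? (y :: ys) ((1:Int) + (k:Int) - 1))) := by
    intro k
    rw [show (1:Int) + ((k+1 : Nat):Int) = ((k+1 : Nat):Int) + 1 by push_cast; ring,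
      PySem.List.pyGet?_cons_succ,
      show ((k+1 : Nat):Int) + 1 - 1 = (k:Int) + 1 by push_cast; ring,
      PySem.List.pyGet?_cons_succ,
      show ((k+1 : Nat):Int) = 1 + (k:Int) by push_cast; ring,
      show (1:Int) + (k:Int) - 1 = (k:Int) by ring]
  have hhead : (!(PySem.List.pyGet? (x :: y :: ys) ((1:Int) + ((0:Nat):Int)) ==
      PySem.List.pyGet? (x :: y :: ys) ((1:Int) + ((0:Nat):Int) - 1))) = !(y == x) := by
    rw [hg1, show (1:Int) + ((0:Nat):Int) - 1 = 0 by norm_num, PySem.List.pyGet?_zero_cons]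
    simp
  unfold pvMid
  rw [PySem.List.pyRange_one, PySem.List.pyRange_one]
  have h1 : ((((x :: y :: ys).length : Nat) : Int) - 1).toNat = ys.length + 1 := by simp
  have h2 : ((((y :: ys).length : Nat) : Int) - 1).toNat = ys.length := by simp
  rw [h1, h2, List.filter_map, List.filter_map, List.range_succ_eq_map, List.filter_cons]
  simp only [Function.comp_apply]
  have hT : (((List.range ys.length).map Nat.succ).filter
        ((fun i => !(PySem.List.pyGet? (x :: y :: ys) i ==
            PySem.List.pyGet? (x :: y :: ys) (i - 1))) ∘ (fun k : Nat => (1:Int) + k))).map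
        (fun k : Nat => (1:Int) + k)
      = (((List.range ys.length).filter
          ((fun i => !(PySem.List.pyGet? (y :: ys) i ==
              PySem.List.pyGet? (y :: ys) (i - 1))) ∘ (fun k : Nat => (1:Int) + k))).map
          (fun k : Nat => (1:Int) + k)).map (· + 1) := by
    rw [List.filter_map, List.map_map, List.map_map]
    have hq : ∀ k ∈ List.range ys.length,
        (((fun i => !(PySem.List.pyGet? (x :: y :: ys) i ==
            PySem.List.pyGet? (x :: y :: ys) (i - 1))) ∘ (fun k : Nat => (1:Int) + k)) ∘ Nat.succ) k
        = ((fun i => !(PySem.List.pyGet? (y :: ys) i ==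
            PySem.List.pyGet? (y :: ys) (i - 1))) ∘ (fun k : Nat => (1:Int) + k)) k := by
      intro k _
      simp only [Function.comp_apply, Nat.succ_eq_add_one]
      exact hpred k
    rw [List.filter_congr hq]
    exact List.map_congr_left (fun k _ => by
      simp only [Function.comp_apply, Nat.succ_eq_add_one]
      push_cast
      ring)
  simp only [hhead]
  by_cases hyx : (y == x) = true
  · simp only [hyx, Bool.not_true, Bool.false_eq_true, if_false, if_true]
    exact hT
  · have hyx' : (y == x) = false := by simpa using hyx
    simp only [hyx', Bool.not_false, if_true, Bool.false_eq_true, if_false, List.map_cons]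
    rw [hT]
    norm_num

theorem pvMid_run (x : Int) (xs : List Int) :
    pvMid (x :: xs) =
      (if xs.dropWhile (· == x) = [] then []
       else (1 + ((xs.takeWhile (· == x)).length : Int)) ::
         (pvMid (xs.dropWhile (· == x))).map
           (· + (1 + ((xs.takeWhile (· == x)).length : Int)))) := by
  induction xs generalizing x with
  | nil => simp [pvMid_single]
  | cons y ys ih =>
    rw [pvMid_cons]
    by_cases hyx : (y == x) = true
    · have hxv : y = x := eq_of_beq hyx
      subst hxv
      rw [ih y]
      simp only [List.dropWhile_cons, List.takeWhile_cons, beq_self_eq_true, if_true,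
        List.length_cons]
      by_cases hr : ys.dropWhile (· == y) = []
      · simp [hr]
      · simp only [hr, if_false, List.map_cons, List.map_map]
        refine List.cons_eq_cons.mpr ⟨by push_cast; ring, ?_⟩
        apply List.map_congr_left
        intro a _
        simp only [Function.comp_apply]
        push_cast
        ring
    · have hyx' : (y == x) = false := by simpa using hyx
      simp only [hyx', Bool.false_eq_true, if_false, List.dropWhile_cons, List.takeWhile_cons]
      rw [if_neg (List.cons_ne_nil y ys)]
      norm_num

theorem mem_pvMid_bounds (l : List Int) (i : Int) (h : i ∈ pvMid l) :
    1 ≤ i ∧ i < (l.length : Int) := by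
  unfold pvMid at h
  have := List.mem_of_mem_filter h
  exact (PySem.List.mem_pyRange_one).1 this

theorem shiftGet (pre r : List Int) (i : Int) (hi : 0 ≤ i) :
    PySem.List.pyGet? (pre ++ r) ((pre.length : Int) + i) = PySem.List.pyGet? r i := by
  obtain ⟨n, rfl⟩ := Int.eq_ofNat_of_zero_le hi
  rw [show ((pre.length : Int) + (n : Int)) = (((pre.length + n : Nat)) : Int) by push_cast; ring]
  rw [PySem.List.pyGet?_natCast, PySem.List.pyGet?_natCast]
  rw [List.getElem?_append_right (by omega)]
  simp

theorem foldB_aux : ∀ (N : Nat) (l : List Int), l.length ≤ N → l ≠ [] →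
    ∀ d : PySem.Dict Int Int,
    ((0 :: (pvMid l ++ [(l.length : Int)])).zip (pvMid l ++ [(l.length : Int)])).foldl
      (fun (d : PySem.Dict Int Int) (p : Int × Int) =>
        match PySem.List.pyGet? l p.1 with
        | none => d
        | some v => d.insert v (max (p.2 - p.1) (d.getD v 0)))
      d = pvRunsFold l d := by
  intro N
  induction N with
  | zero =>
    intro l hN hl d
    cases l with
    | nil => exact absurd rfl hl
    | cons a as => simp at hN
  | succ N ih =>
    intro l hN hl d
    match l, hl with
    | x :: xs, _ =>
    have hxs : xs.takeWhile (· == x) ++ xs.dropWhile (· == x) = xs :=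
      List.takeWhile_append_dropWhile
    have hxslen : (xs.takeWhile (· == x)).length + (xs.dropWhile (· == x)).length = xs.length := by
      have h := congrArg List.length hxs
      rw [List.length_append] at h
      omega
    by_cases hre : xs.dropWhile (· == x) = []
    · -- single run: xs is all x's
      have hlenxs : (xs.takeWhile (· == x)).length = xs.length := by
        rw [hre] at hxslen
        simpa using hxslen
      have hn : ((x :: xs).length : Int) - 0 = 1 + ((xs.takeWhile (· == x)).length : Int) := by
        rw [hlenxs]
        push_cast [List.length_cons]
        ring
      rw [pvMid_run x xs]
      simp only [hre, if_true, List.nil_append]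
      rw [List.zip_cons_cons, List.zip_nil_right]
      simp only [List.foldl_cons, List.foldl_nil, PySem.List.pyGet?_zero_cons]
      rw [hn, pvRunsFold, pvRuns, hre]
      simp [pvRuns]
    · -- at least two runs
      set k : Int := 1 + ((xs.takeWhile (· == x)).length : Int) with hk
      have hlen : ((x :: xs).length : Int) = ((xs.dropWhile (· == x)).length : Int) + k := by
        simp only [List.length_cons, hk]
        push_cast
        omega
      have hcuts : pvMid (x :: xs) ++ [((x :: xs).length : Int)]
          = (0 :: (pvMid (xs.dropWhile (· == x)) ++ [((xs.dropWhile (· == x)).length : Int)])).map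
              (· + k) := by
        rw [pvMid_run x xs]
        simp only [hre, if_false, List.map_cons, List.map_append, List.map_nil]
        rw [hlen]
        simp [hk]
      rw [hcuts, List.map_cons, List.zip_cons_cons, List.foldl_cons]
      have hz : (((0 : Int) + k) :: ((pvMid (xs.dropWhile (· == x)) ++
            [((xs.dropWhile (· == x)).length : Int)]).map (· + k))).zip
            ((pvMid (xs.dropWhile (· == x)) ++
              [((xs.dropWhile (· == x)).length : Int)]).map (· + k))
          = (((0 : Int) :: (pvMid (xs.dropWhile (· == x)) ++
              [((xs.dropWhile (· == x)).length : Int)])).zip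
              (pvMid (xs.dropWhile (· == x)) ++
                [((xs.dropWhile (· == x)).length : Int)])).map
              (Prod.map (· + k) (· + k)) := by
        rw [← List.map_cons (f := (· + k))]
        rw [List.zip_map]
      rw [hz, List.foldl_map]
      have hhead : (match PySem.List.pyGet? (x :: xs) 0 with
          | none => d
          | some v => d.insert v (max ((0 + k) - 0) (d.getD v 0)))
          = d.insert x (max k (d.getD x 0)) := by
        rw [PySem.List.pyGet?_zero_cons]
        norm_num
      rw [hhead]
      simp only [Prod.map_fst, Prod.map_snd]
      -- shifted indices read the dropWhile suffix
      have hget : ∀ i : Int, 0 ≤ i →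
          PySem.List.pyGet? (x :: xs) (i + k) = PySem.List.pyGet? (xs.dropWhile (· == x)) i := by
        intro i hi
        have hsplit : x :: xs = (x :: xs.takeWhile (· == x)) ++ xs.dropWhile (· == x) := by
          simp [hxs]
        have hklen : ((x :: xs.takeWhile (· == x)).length : Int) = k := by
          simp only [List.length_cons, hk]
          push_cast
          ring
        rw [hsplit, show i + k = ((x :: xs.takeWhile (· == x)).length : Int) + i by
          rw [hklen]; ring]
        exact shiftGet _ _ i hi
      have hnonneg : ∀ p ∈ (((0 : Int) :: (pvMid (xs.dropWhile (· == x)) ++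
            [((xs.dropWhile (· == x)).length : Int)])).zip
            (pvMid (xs.dropWhile (· == x)) ++
              [((xs.dropWhile (· == x)).length : Int)])), (0 : Int) ≤ p.1 := by
        intro p hp
        have hmem := (List.of_mem_zip hp).1
        rcases List.mem_cons.1 hmem with h0 | hmem'
        · omega
        · rcases List.mem_append.1 hmem' with hmid | hlast
          · have := mem_pvMid_bounds _ _ hmid
            omega
          · simp at hlast
            omega
      have hmain : ∀ (L : List (Int × Int)) (acc : PySem.Dict Int Int),
          (∀ p ∈ L, (0 : Int) ≤ p.1) →
          L.foldl (fun (acc : PySem.Dict Int Int) (p : Int × Int) =>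
            match PySem.List.pyGet? (x :: xs) (p.1 + k) with
            | none => acc
            | some v => acc.insert v (max ((p.2 + k) - (p.1 + k)) (acc.getD v 0))) acc
          = L.foldl (fun (acc : PySem.Dict Int Int) (p : Int × Int) =>
            match PySem.List.pyGet? (xs.dropWhile (· == x)) p.1 with
            | none => acc
            | some v => acc.insert v (max (p.2 - p.1) (acc.getD v 0))) acc := by
        intro L
        induction L with
        | nil => intro acc _; rfl
        | cons q qs ihL =>
          intro acc hnn
          simp only [List.foldl_cons]
          rw [hget q.1 (hnn q (by simp)),
            show (q.2 + k) - (q.1 + k) = q.2 - q.1 by ring]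
          exact ihL _ (fun p hp => hnn p (List.mem_cons_of_mem _ hp))
      rw [hmain _ _ hnonneg]
      have hlt : (xs.dropWhile (· == x)).length ≤ N := by
        have := List.length_dropWhile_le (· == x) xs
        simp only [List.length_cons] at hN
        omega
      rw [ih _ hlt hre, hk]
      simp only [pvRunsFold, pvRuns, List.foldl_cons]

theorem foldB_eq_runs_fold (l : List Int) (hl : l ≠ []) (d : PySem.Dict Int Int) :
    ((0 :: (pvMid l ++ [(l.length : Int)])).zip
        (PySem.List.slice (0 :: (pvMid l ++ [(l.length : Int)])) (some 1) none)).foldl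
      (fun (d : PySem.Dict Int Int) (p : Int × Int) =>
        match PySem.List.pyGet? l p.1 with
        | none => d
        | some v => d.insert v (max (p.2 - p.1) (d.getD v 0)))
      d = pvRunsFold l d := by
  rw [PySem.List.slice_from_one, List.tail_cons]
  exact foldB_aux l.length l le_rfl hl d

-- ===== VERDICT (by name: the statement is the Claim_ definition above) =====
theorem getSubLengths_spec : Claim_equal_getSubLengths := by
  intro l _ hpre
  unfold Spec_getSubLengths
  match l with
  | [] => exact absurd rfl hpre
  | h :: t =>
    have hb := foldA_eq_loopA t [] h PySem.Dict.empty 1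
    simp only [List.nil_append, List.length_nil, Nat.cast_zero, zero_add] at hb
    have hfirst :
        (match PySem.List.pyGet? (h :: t) ((0 : Int) - 1) with
          | none => ((PySem.Dict.empty : PySem.Dict Int Int), (1 : Int))
          | some lastEl =>
            if ((0 : Int) == 0) then (PySem.Dict.empty, 1)
            else if (h == lastEl) then ((PySem.Dict.empty : PySem.Dict Int Int), (1 : Int) + 1)
            else ((PySem.Dict.empty : PySem.Dict Int Int).insert lastEl
                (max 1 ((PySem.Dict.empty : PySem.Dict Int Int).getD lastEl 0)), 1))
        = ((PySem.Dict.empty : PySem.Dict Int Int), (1 : Int)) := by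
      cases hm : PySem.List.pyGet? (h :: t) ((0 : Int) - 1) <;> simp
    simp only [getSubLengths, PySem.List.enumerate_cons, List.foldl_cons]
    rw [show ((0 : Int) + 1) = (1 : Int) by ring] at *
    simp only [hfirst] at *
    rw [hb, loopA_eq_runs_fold]
    have hB := foldB_eq_runs_fold (h :: t) (by simp) PySem.Dict.empty
    simp only [getSubLengths_alt]
    rw [hB]
    simp [pvRunsFold, pvRuns]
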